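-- pv_equiv track=rewrite | github.com/KaikeMiguel/Calculation-Algorithms | linear_regression.py | gds
-- ===== SOURCE A (Python) =====
-- def gds(dataset_x, dataset_y, coef):
--     n = len(coef)
--     gradientes = [0] * n
--
--     for i in range(len(dataset_x)):
--
--         x = dataset_x[i]
--         y = dataset_y[i]
--
--         for k in range(n):
--             soma = 0
--
--             for j in range(n):
--                 soma += coef[j]*(x**(n-j-1))
--
--             gradientes[k] += 2 * (y - soma) * -(x**(7-k))
--
--     return gradientes
-- ===== SOURCE B (Python) =====
-- def gds(dataset_x, dataset_y, coef):
--     n = len(coef)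
--     residuals = [y - sum(c * x ** (n - j - 1) for j, c in enumerate(coef))
--                  for x, y in zip(dataset_x, dataset_y)]
--     return [sum(2 * r * -(x ** (7 - k)) for x, r in zip(dataset_x, residuals))
--             for k in range(n)]
-- ===== Notes on version B (the rewrite author's own statement) =====
-- stated objective: faster
-- what changed: B precomputes each point's residual once in a single pass and swaps the loop nesting (outer over coefficients, inner a sum over points), where A recomputes the same inner soma sum n times for every point, removing a factor of n.
import Mathlib
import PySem

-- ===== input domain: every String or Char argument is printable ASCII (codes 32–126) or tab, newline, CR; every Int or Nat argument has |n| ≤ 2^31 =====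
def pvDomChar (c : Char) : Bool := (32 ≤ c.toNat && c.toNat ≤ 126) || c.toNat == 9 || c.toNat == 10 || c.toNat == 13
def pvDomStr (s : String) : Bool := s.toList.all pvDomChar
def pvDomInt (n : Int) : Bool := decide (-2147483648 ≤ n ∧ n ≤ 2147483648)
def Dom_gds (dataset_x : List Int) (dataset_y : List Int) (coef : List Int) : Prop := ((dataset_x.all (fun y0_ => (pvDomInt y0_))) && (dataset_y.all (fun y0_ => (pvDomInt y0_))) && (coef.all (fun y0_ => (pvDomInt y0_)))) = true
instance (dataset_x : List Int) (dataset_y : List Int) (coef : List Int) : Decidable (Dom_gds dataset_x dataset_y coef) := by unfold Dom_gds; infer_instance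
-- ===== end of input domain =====

-- B precomputes per-point residuals once and swaps the loop nesting (objective: faster — A recomputes the same soma n times per point).

-- ===== PORT A =====
-- literal transliteration of A; dataset_y[i] is dy.getD i 0 (exact inside Pre_, which
-- guarantees i < dataset_y.length), and x**(7-k) is x ^ (7 - k) on Nat (exact inside
-- Pre_, which guarantees k ≤ 7 whenever dataset_x is nonempty).
def gds (dataset_x : List Int) (dataset_y : List Int) (coef : List Int) : List Int :=
  let n := coef.length
  (List.range dataset_x.length).foldl (fun gradientes i =>
    let x := dataset_x.getD i 0
    let y := dataset_y.getD i 0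
    (List.range n).foldl (fun g k =>
      let soma := (List.range n).foldl (fun s j => s + coef.getD j 0 * x ^ (n - j - 1)) 0
      g.set k (g.getD k 0 + 2 * (y - soma) * (-(x ^ (7 - k))))) gradientes)
    (List.replicate n 0)

-- ===== PORT B =====
-- literal transliteration of Source B: a residuals table built in one pass over zip(x, y),
-- then one sum per coefficient index k.
def gds_alt (dataset_x : List Int) (dataset_y : List Int) (coef : List Int) : List Int :=
  let n := coef.length
  let residuals := (dataset_x.zip dataset_y).map (fun p =>
    p.2 - (coef.zipIdx.foldl (fun s cj => s + cj.1 * p.1 ^ (n - cj.2 - 1)) 0))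
  (List.range n).map (fun k =>
    (dataset_x.zip residuals).foldl (fun s p => s + 2 * p.2 * (-(p.1 ^ (7 - k)))) 0)

-- ===== PRECONDITION & SPEC =====
-- Pre_ excludes inputs where A raises (dataset_y shorter than dataset_x: IndexError;
-- a zero x with more than 8 coefficients: ZeroDivisionError from 0**negative) and inputs
-- where A returns floats instead of ints (nonzero x with more than 8 coefficients,
-- since the exponent 7-k goes negative) — floats are outside the declared return type.
def Pre_gds (dataset_x : List Int) (dataset_y : List Int) (coef : List Int) : Prop :=
  dataset_x.length ≤ dataset_y.length ∧ (dataset_x = [] ∨ coef.length ≤ 8)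
instance (dataset_x : List Int) (dataset_y : List Int) (coef : List Int) : Decidable (Pre_gds dataset_x dataset_y coef) := by unfold Pre_gds; infer_instance

def pvWitness_gds : List Int × List Int × List Int := ([1, 2, 3], [2, 4, 7], [1, -2])

def Spec_gds (dataset_x : List Int) (dataset_y : List Int) (coef : List Int) (out : List Int) : Prop := out = gds_alt dataset_x dataset_y coef
instance (dataset_x : List Int) (dataset_y : List Int) (coef : List Int) (out : List Int) : Decidable (Spec_gds dataset_x dataset_y coef out) := by unfold Spec_gds; infer_instance

-- ===== CLAIM (what is proved, stated in full; the proofs are below) =====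
def Claim_equal_gds : Prop := ∀ (dataset_x : List Int) (dataset_y : List Int) (coef : List Int), Dom_gds dataset_x dataset_y coef → Pre_gds dataset_x dataset_y coef → Spec_gds dataset_x dataset_y coef (gds dataset_x dataset_y coef)

-- ===== LEMMAS AND PROOFS =====

-- folding "+ f x" is a sum
theorem pv_foldl_add_sum {α : Type} (f : α → Int) :
    ∀ (l : List α) (a : Int), l.foldl (fun s x => s + f x) a = a + (l.map f).sum := by
  intro l
  induction l with
  | nil => intro a; simp
  | cons x xs ih => intro a; simp [List.foldl_cons, ih]; ring

-- folding set-at-each-index over range m adds f k at every index k < m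
theorem pv_fold_set (f : Nat → Int) :
    ∀ (m : Nat) (g : List Int),
      (List.range m).foldl (fun h k => h.set k (h.getD k 0 + f k)) g
      = (g.zipIdx).map (fun p => if p.2 < m then p.1 + f p.2 else p.1) := by
  intro m
  induction m with
  | zero =>
    intro g
    simp
  | succ m ih =>
    intro g
    rw [List.range_succ, List.foldl_append, ih, List.foldl_cons, List.foldl_nil]
    apply List.ext_getElem
    · simp
    · intro i h1 h2
      simp only [List.length_map, List.length_zipIdx] at h2
      by_cases hi : i = m
      · subst hi
        rw [List.getElem_set_self]
        · rw [List.getD_eq_getElem _ _ (by simpa using h2)]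
          simp [List.getElem_zipIdx]
      · rw [List.getElem_set_ne (by omega)]
        simp only [List.getElem_map, List.getElem_zipIdx]
        have : (i < m + 1) = (i < m) := by
          apply propext; constructor <;> intro <;> omega
        simp [this]

-- fold over range n starting from a range-map is the pointwise sum
theorem pv_fold_set_map (n : Nat) (F f : Nat → Int) :
    (List.range n).foldl (fun h k => h.set k (h.getD k 0 + f k)) ((List.range n).map F)
    = (List.range n).map (fun k => F k + f k) := by
  rw [pv_fold_set]
  apply List.ext_getElem
  · simp
  · intro i h1 h2
    simp only [List.length_map, List.length_range] at h2
    simp [List.getElem_zipIdx, h2]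

theorem gds_spec : Claim_equal_gds := by
  intro dx dy coef _hdom hpre
  unfold Spec_gds gds gds_alt
  rcases hpre with ⟨hlen, hco⟩
  rcases hco with hnil | h8
  · subst hnil
    simp
  · -- dataset_x nonempty case bound not needed beyond k ≤ 7; n := coef.length
    set n := coef.length with hn
    -- per-point term, as computed by A
    set f : Nat → Nat → Int := fun i k =>
      2 * (dy.getD i 0 -
        (List.range n).foldl (fun s j => s + coef.getD j 0 * (dx.getD i 0) ^ (n - j - 1)) 0)
        * (-(dx.getD i 0 ^ (7 - k))) with hf
    -- characterize A's outer fold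
    have hA : ∀ m : Nat,
        (List.range m).foldl (fun gradientes i =>
          (List.range n).foldl (fun g k =>
            g.set k (g.getD k 0 +
              2 * (dy.getD i 0 -
                (List.range n).foldl (fun s j => s + coef.getD j 0 * (dx.getD i 0) ^ (n - j - 1)) 0)
              * (-(dx.getD i 0 ^ (7 - k))))) gradientes)
          (List.replicate n 0)
        = (List.range n).map (fun k => ((List.range m).map (fun i => f i k)).sum) := by
      intro m
      induction m with
      | zero => simp
      | succ m ih =>
        rw [List.range_succ, List.foldl_append, ih, List.foldl_cons, List.foldl_nil]
        rw [show (fun (g : List Int) k =>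
            g.set k (g.getD k 0 +
              2 * (dy.getD m 0 -
                (List.range n).foldl (fun s j => s + coef.getD j 0 * (dx.getD m 0) ^ (n - j - 1)) 0)
              * (-(dx.getD m 0 ^ (7 - k)))))
          = fun (g : List Int) k => g.set k (g.getD k 0 + f m k) from by
            funext g k; rw [hf]]
        rw [pv_fold_set_map]
        apply List.map_congr_left
        intro k _
        rw [List.map_append, List.sum_append]
        simp
    rw [hA dx.length]
    -- now compare with B, map over range n pointwise
    apply List.map_congr_left
    intro k _
    rw [pv_foldl_add_sum, Int.zero_add]
    -- the two per-point term lists coincide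
    congr 1
    apply List.ext_getElem
    · simp [Nat.min_eq_left hlen]
    · intro i h1 h2
      have hix : i < dx.length := by
        simpa [Nat.min_eq_left hlen] using h1
      have hiy : i < dy.length := lt_of_lt_of_le hix hlen
      simp only [List.getElem_map, List.getElem_zip, List.getElem_range, hf]
      rw [pv_foldl_add_sum (fun j => coef.getD j 0 * (dx.getD i 0) ^ (n - j - 1)),
          pv_foldl_add_sum (fun cj : Int × Nat => cj.1 * dx[i] ^ (n - cj.2 - 1)),
          Int.zero_add, Int.zero_add]
      have hsoma :
          ((List.range n).map (fun j => coef.getD j 0 * (dx.getD i 0) ^ (n - j - 1))).sum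
          = ((coef.zipIdx).map (fun cj => cj.1 * dx[i] ^ (n - cj.2 - 1))).sum := by
        congr 1
        apply List.ext_getElem
        · simp [hn]
        · intro j hj1 hj2
          have hjn : j < coef.length := by simpa [hn] using hj1
          simp only [List.getElem_map, List.getElem_range, List.getElem_zipIdx]
          rw [List.getD_eq_getElem _ _ hjn, List.getD_eq_getElem _ _ hix]
          simp
      rw [List.getD_eq_getElem _ _ hiy, hsoma, List.getD_eq_getElem _ _ hix]
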